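-- pv_equiv track=rewrite | github.com/heavi715/json_decode_streaming | python/repair_json.py | _scan_number_end
-- ===== SOURCE A (Python) =====
-- def _scan_number_end(text: str, start: int) -> int:
--     i = start
--     n = len(text)
--
--     if i < n and text[i] == "-":
--         i += 1
--         if i >= n:
--             return -1
--
--     if i >= n:
--         return -1
--
--     if text[i] == "0":
--         i += 1
--     elif "1" <= text[i] <= "9":
--         i += 1
--         while i < n and "0" <= text[i] <= "9":
--             i += 1
--     else:
--         return -1
--
--     if i < n and text[i] == ".":
--         if i + 1 >= n or not ("0" <= text[i + 1] <= "9"):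
--             return i - 1
--         i += 2
--         while i < n and "0" <= text[i] <= "9":
--             i += 1
--
--     if i < n and (text[i] == "e" or text[i] == "E"):
--         if i + 1 >= n:
--             return i - 1
--         j = i + 1
--         if text[j] == "+" or text[j] == "-":
--             j += 1
--         if j >= n or not ("0" <= text[j] <= "9"):
--             return i - 1
--         i = j + 1
--         while i < n and "0" <= text[i] <= "9":
--             i += 1
--
--     return i - 1
-- ===== SOURCE B (Python) =====
-- # B: single-pass table-driven DFA over the characters, tracking the last index at
-- # which an accepting state was reached, instead of A's phase-structured scanner.
-- _DIGITS = "0123456789"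
--
--
-- def _mk_table():
--     t = [dict() for _ in range(9)]
--     # 0 start, 1 after '-', 2 after leading '0', 3 in integer digits,
--     # 4 after '.', 5 in fraction digits, 6 after e/E, 7 after exponent sign,
--     # 8 in exponent digits
--     t[0]['-'] = 1
--     t[0]['0'] = 2
--     t[1]['0'] = 2
--     for d in "123456789":
--         t[0][d] = 3
--         t[1][d] = 3
--     for st in (2, 3):
--         t[st]['.'] = 4
--     for st in (2, 3, 5):
--         t[st]['e'] = 6
--         t[st]['E'] = 6
--     for d in _DIGITS:
--         t[3][d] = 3
--         t[4][d] = 5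
--         t[5][d] = 5
--         t[6][d] = 8
--         t[7][d] = 8
--         t[8][d] = 8
--     t[6]['+'] = 7
--     t[6]['-'] = 7
--     return t
--
--
-- _TABLE = _mk_table()
-- _ACCEPT = frozenset({2, 3, 5, 8})
--
--
-- def _scan_number_end(text: str, start: int) -> int:
--     state = 0
--     last = -1
--     for i in range(start, len(text)):
--         nxt = _TABLE[state].get(text[i])
--         if nxt is None:
--             break
--         state = nxt
--         if state in _ACCEPT:
--             last = i
--     return last
-- ===== Notes on version B (the rewrite author's own statement) =====
-- stated objective: alternative
-- what changed: A's phase-structured scanner (optional sign, integer, fraction, exponent phases with manual back-off returns) is replaced by a single forward loop over a 9-state DFA transition table that records the last index at which an accepting state was reached.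
import Mathlib
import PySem

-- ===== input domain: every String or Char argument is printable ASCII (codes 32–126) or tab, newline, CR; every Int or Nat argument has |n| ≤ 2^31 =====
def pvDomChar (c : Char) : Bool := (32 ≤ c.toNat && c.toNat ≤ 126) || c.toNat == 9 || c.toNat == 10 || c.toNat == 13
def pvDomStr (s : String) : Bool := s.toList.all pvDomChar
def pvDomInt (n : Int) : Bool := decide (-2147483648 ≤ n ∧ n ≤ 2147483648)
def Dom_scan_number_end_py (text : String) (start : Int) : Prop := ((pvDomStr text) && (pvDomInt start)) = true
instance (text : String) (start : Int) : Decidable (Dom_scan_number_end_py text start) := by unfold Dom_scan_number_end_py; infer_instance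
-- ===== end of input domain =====

-- B replaces A's phase-structured number scanner by a single pass over a DFA
-- transition table that records the last accepting index (alternative algorithm, same cost).


-- ===== PORT A =====
-- text[i] ports to PySem.List.pyGetD on text.toList (Python negative indexing);
-- the default ' ' is never read inside Pre_ (outside Pre_, Python raises IndexError).
def chAt (text : String) (i : Int) : Char := PySem.List.pyGetD text.toList i ' '

def pyDigit (c : Char) : Bool := '0' ≤ c ∧ c ≤ '9'

-- while i < n and "0" <= text[i] <= "9": i += 1   (returns the final i)
def aDigitsEnd (text : String) (n i : Int) : Int :=
  if h : i < n ∧ pyDigit (chAt text i) then aDigitsEnd text n (i + 1) else i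
  termination_by (n - i).toNat
  decreasing_by omega

-- A's exponent block (entered with i at the position after the frac/int part)
def aAfterFrac (text : String) (n i : Int) : Int :=
  if i < n ∧ (chAt text i = 'e' ∨ chAt text i = 'E') then
    if i + 1 ≥ n then i - 1
    else
      let j := if chAt text (i + 1) = '+' ∨ chAt text (i + 1) = '-' then i + 2 else i + 1
      if j ≥ n ∨ ¬ pyDigit (chAt text j) then i - 1
      else aDigitsEnd text n (j + 1) - 1
  else i - 1

-- A's fraction block (entered with i just after the integer part)
def aAfterInt (text : String) (n i : Int) : Int :=
  if i < n ∧ chAt text i = '.' then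
    if i + 1 ≥ n ∨ ¬ pyDigit (chAt text (i + 1)) then i - 1
    else aAfterFrac text n (aDigitsEnd text n (i + 2))
  else aAfterFrac text n i

def scan_number_end_py (text : String) (start : Int) : Int :=
  let n : Int := PySem.Str.len text
  let i0 := start
  if i0 < n ∧ chAt text i0 = '-' then
    let i1 := i0 + 1
    if i1 ≥ n then -1
    else if chAt text i1 = '0' then aAfterInt text n (i1 + 1)
    else if '1' ≤ chAt text i1 ∧ chAt text i1 ≤ '9' then
      aAfterInt text n (aDigitsEnd text n (i1 + 1))
    else -1
  else
    if i0 ≥ n then -1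
    else if chAt text i0 = '0' then aAfterInt text n (i0 + 1)
    else if '1' ≤ chAt text i0 ∧ chAt text i0 ≤ '9' then
      aAfterInt text n (aDigitsEnd text n (i0 + 1))
    else -1

-- ===== PORT B =====
-- _TABLE[state].get(ch): the constant transition table of Source B as a step function
def bStep (state : Int) (ch : Char) : Option Int :=
  if state = 0 then
    if ch = '-' then some 1 else if ch = '0' then some 2
    else if '1' ≤ ch ∧ ch ≤ '9' then some 3 else none
  else if state = 1 then
    if ch = '0' then some 2 else if '1' ≤ ch ∧ ch ≤ '9' then some 3 else none
  else if state = 2 then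
    if ch = '.' then some 4 else if ch = 'e' ∨ ch = 'E' then some 6 else none
  else if state = 3 then
    if pyDigit ch then some 3 else if ch = '.' then some 4
    else if ch = 'e' ∨ ch = 'E' then some 6 else none
  else if state = 4 then
    if pyDigit ch then some 5 else none
  else if state = 5 then
    if pyDigit ch then some 5 else if ch = 'e' ∨ ch = 'E' then some 6 else none
  else if state = 6 then
    if ch = '+' ∨ ch = '-' then some 7 else if pyDigit ch then some 8 else none
  else if state = 7 then
    if pyDigit ch then some 8 else none
  else if state = 8 then
    if pyDigit ch then some 8 else none
  else none

def bAccept (state : Int) : Bool := state = 2 ∨ state = 3 ∨ state = 5 ∨ state = 8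

-- for i in range(start, len(text)): … break on missing transition
def bRun (text : String) : List Int → Int → Int → Int
  | [], _, last => last
  | i :: rest, state, last =>
    match bStep state (chAt text i) with
    | none => last
    | some st => bRun text rest st (if bAccept st then i else last)

def scan_number_end_py_alt (text : String) (start : Int) : Int :=
  bRun text (PySem.List.pyRange start (PySem.Str.len text) 1) 0 (-1)

-- ===== PRECONDITION & SPEC =====
-- Pre_ excludes exactly the inputs where Python A raises IndexError (start below -len(text)).
def Pre_scan_number_end_py (text : String) (start : Int) : Prop :=
  -(PySem.Str.len text) ≤ start
instance (text : String) (start : Int) : Decidable (Pre_scan_number_end_py text start) := by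
  unfold Pre_scan_number_end_py; infer_instance

def pvWitness_scan_number_end_py : String × Int := ("-12.5e+3", 0)

def Spec_scan_number_end_py (text : String) (start : Int) (out : Int) : Prop := out = scan_number_end_py_alt text start
instance (text : String) (start : Int) (out : Int) : Decidable (Spec_scan_number_end_py text start out) := by unfold Spec_scan_number_end_py; infer_instance

-- ===== CLAIM (what is proved, stated in full; the proofs are below) =====
def Claim_equal_scan_number_end_py : Prop := ∀ (text : String) (start : Int), Dom_scan_number_end_py text start → Pre_scan_number_end_py text start → Spec_scan_number_end_py text start (scan_number_end_py text start)

-- ===== LEMMAS AND PROOFS =====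

-- bStep at each literal state
lemma bStep_zero (ch : Char) : bStep 0 ch =
    (if ch = '-' then some 1 else if ch = '0' then some 2
     else if '1' ≤ ch ∧ ch ≤ '9' then some 3 else none) := rfl
lemma bStep_one (ch : Char) : bStep 1 ch =
    (if ch = '0' then some 2 else if '1' ≤ ch ∧ ch ≤ '9' then some 3 else none) := rfl
lemma bStep_two (ch : Char) : bStep 2 ch =
    (if ch = '.' then some 4 else if ch = 'e' ∨ ch = 'E' then some 6 else none) := rfl
lemma bStep_three (ch : Char) : bStep 3 ch =
    (if pyDigit ch then some 3 else if ch = '.' then some 4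
     else if ch = 'e' ∨ ch = 'E' then some 6 else none) := rfl
lemma bStep_four (ch : Char) : bStep 4 ch = (if pyDigit ch then some 5 else none) := rfl
lemma bStep_five (ch : Char) : bStep 5 ch =
    (if pyDigit ch then some 5 else if ch = 'e' ∨ ch = 'E' then some 6 else none) := rfl
lemma bStep_six (ch : Char) : bStep 6 ch =
    (if ch = '+' ∨ ch = '-' then some 7 else if pyDigit ch then some 8 else none) := rfl
lemma bStep_seven (ch : Char) : bStep 7 ch = (if pyDigit ch then some 8 else none) := rfl
lemma bStep_eight (ch : Char) : bStep 8 ch = (if pyDigit ch then some 8 else none) := rfl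

lemma bAcc1 : bAccept 1 = false := rfl
lemma bAcc2 : bAccept 2 = true := rfl
lemma bAcc3 : bAccept 3 = true := rfl
lemma bAcc4 : bAccept 4 = false := rfl
lemma bAcc5 : bAccept 5 = true := rfl
lemma bAcc6 : bAccept 6 = false := rfl
lemma bAcc7 : bAccept 7 = false := rfl
lemma bAcc8 : bAccept 8 = true := rfl

lemma aDigitsEnd_stop (text : String) (n i : Int)
    (h : ¬ (i < n ∧ pyDigit (chAt text i))) : aDigitsEnd text n i = i := by
  rw [aDigitsEnd]; simp [h]

-- state 8 (exponent digits): a pure digit run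
lemma bRun_st8 (text : String) (n : Int) :
    ∀ i l, l = i - 1 → bRun text (PySem.List.pyRange i n 1) 8 l = aDigitsEnd text n i - 1 := by
  suffices H : ∀ k i l, (n - i).toNat ≤ k → l = i - 1 →
      bRun text (PySem.List.pyRange i n 1) 8 l = aDigitsEnd text n i - 1 by
    intro i l hl; exact H (n - i).toNat i l le_rfl hl
  intro k
  induction k with
  | zero =>
    intro i l hk hl
    rw [PySem.List.pyRange_one_eq_nil (by omega),
        aDigitsEnd_stop text n i (by intro h; omega)]
    simp [bRun]; omega
  | succ k ih =>
    intro i l hk hl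
    by_cases hin : i < n
    · rw [PySem.List.pyRange_one_cons hin]
      by_cases hd : pyDigit (chAt text i)
      · rw [aDigitsEnd]
        simp only [bRun, bStep_eight, bAcc8, hd, hin, and_self, if_true]
        exact ih (i + 1) i (by omega) (by ring)
      · rw [aDigitsEnd_stop text n i (by tauto)]
        simp only [bRun, bStep_eight, hd, if_false, Bool.false_eq_true]
        omega
    · rw [PySem.List.pyRange_one_eq_nil (by omega),
          aDigitsEnd_stop text n i (by tauto)]
      simp [bRun]; omega

-- state 6 (just read e/E at position i): A's exponent block
lemma bRun_st6 (text : String) (n : Int) :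
    ∀ i l, i < n → (chAt text i = 'e' ∨ chAt text i = 'E') → l = i - 1 →
      bRun text (PySem.List.pyRange (i + 1) n 1) 6 l = aAfterFrac text n i := by
  intro i l hi he hl
  rw [aAfterFrac]
  by_cases h1 : i + 1 ≥ n
  · rw [PySem.List.pyRange_one_eq_nil (by omega)]
    simp [bRun, hi, he, h1]; omega
  · rw [PySem.List.pyRange_one_cons (by omega)]
    by_cases hs : chAt text (i + 1) = '+' ∨ chAt text (i + 1) = '-'
    · simp only [bRun, bStep_six, bAcc7, hs, if_true]
      by_cases h2 : i + 1 + 1 ≥ n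
      · rw [PySem.List.pyRange_one_eq_nil (by omega)]
        simp only [bRun]
        simp [hi, he, h1, show i + 2 ≥ n from by omega]
        omega
      · rw [PySem.List.pyRange_one_cons (by omega)]
        by_cases hd2 : pyDigit (chAt text (i + 1 + 1))
        · simp only [bRun, bStep_seven, bAcc8, hd2, if_true]
          rw [bRun_st8 text n (i + 1 + 1 + 1) (i + 1 + 1) (by ring)]
          have hd2' : pyDigit (chAt text (i + 2)) := by
            rw [show (i:Int) + 2 = i + 1 + 1 by ring]; exact hd2
          simp [hi, he, h1, show ¬ (i + 2 ≥ n) from by omega, hd2']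
          rw [show (i:Int) + 2 + 1 = i + 1 + 1 + 1 by ring]
        · simp only [bRun, bStep_seven, hd2, if_false, Bool.false_eq_true]
          have hd2' : ¬ pyDigit (chAt text (i + 2)) := by
            rw [show (i:Int) + 2 = i + 1 + 1 by ring]; exact hd2
          simp [hi, he, h1, hd2']
          omega
    · by_cases hd1 : pyDigit (chAt text (i + 1))
      · simp only [bRun, bStep_six, bAcc8, hs, hd1, if_true, if_false]
        rw [bRun_st8 text n (i + 1 + 1) (i + 1) (by ring)]
        simp [hi, he, h1]
      · simp only [bRun, bStep_six, hs, hd1, if_false, Bool.false_eq_true]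
        simp [hi, he, h1]
        omega

-- state 5 (fraction digits)
lemma bRun_st5 (text : String) (n : Int) :
    ∀ i l, l = i - 1 →
      bRun text (PySem.List.pyRange i n 1) 5 l = aAfterFrac text n (aDigitsEnd text n i) := by
  suffices H : ∀ k i l, (n - i).toNat ≤ k → l = i - 1 →
      bRun text (PySem.List.pyRange i n 1) 5 l = aAfterFrac text n (aDigitsEnd text n i) by
    intro i l hl; exact H (n - i).toNat i l le_rfl hl
  intro k
  induction k with
  | zero =>
    intro i l hk hl
    rw [PySem.List.pyRange_one_eq_nil (by omega),
        aDigitsEnd_stop text n i (by intro h; omega), aAfterFrac]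
    simp [bRun, show ¬ i < n from by omega]
    omega
  | succ k ih =>
    intro i l hk hl
    by_cases hin : i < n
    · rw [PySem.List.pyRange_one_cons hin]
      by_cases hd : pyDigit (chAt text i)
      · conv_rhs => rw [aDigitsEnd]
        simp only [bRun, bStep_five, bAcc5, hd, hin, and_self, if_true]
        exact ih (i + 1) i (by omega) (by ring)
      · rw [aDigitsEnd_stop text n i (by tauto)]
        by_cases he : chAt text i = 'e' ∨ chAt text i = 'E'
        · simp only [bRun, bStep_five, bAcc6, hd, he, if_true, if_false,
            Bool.false_eq_true]
          exact bRun_st6 text n i l hin he hl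
        · rw [aAfterFrac]
          simp [bRun, bStep_five, hd, he, hin]
          omega
    · rw [PySem.List.pyRange_one_eq_nil (by omega),
          aDigitsEnd_stop text n i (by tauto), aAfterFrac]
      simp [bRun, hin]
      omega

-- state 4 (just read '.' at position i): A's fraction entry check
lemma bRun_st4 (text : String) (n : Int) :
    ∀ i l, i < n → chAt text i = '.' → l = i - 1 →
      bRun text (PySem.List.pyRange (i + 1) n 1) 4 l = aAfterInt text n i := by
  intro i l hi hdot hl
  rw [aAfterInt]
  by_cases h1 : i + 1 ≥ n
  · rw [PySem.List.pyRange_one_eq_nil (by omega)]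
    simp [bRun, hi, hdot, h1]
    omega
  · rw [PySem.List.pyRange_one_cons (by omega)]
    by_cases hd : pyDigit (chAt text (i + 1))
    · simp only [bRun, bStep_four, bAcc5, hd, if_true]
      rw [bRun_st5 text n (i + 1 + 1) (i + 1) (by ring)]
      simp [hi, hdot, h1]
      rw [show (i:Int) + 2 = i + 1 + 1 by ring]
    · simp only [bRun, bStep_four, hd, if_false, Bool.false_eq_true]
      simp [hi, hdot, h1]
      omega

-- state 3 (integer digits)
lemma bRun_st3 (text : String) (n : Int) :
    ∀ i l, l = i - 1 →
      bRun text (PySem.List.pyRange i n 1) 3 l = aAfterInt text n (aDigitsEnd text n i) := by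
  suffices H : ∀ k i l, (n - i).toNat ≤ k → l = i - 1 →
      bRun text (PySem.List.pyRange i n 1) 3 l = aAfterInt text n (aDigitsEnd text n i) by
    intro i l hl; exact H (n - i).toNat i l le_rfl hl
  intro k
  induction k with
  | zero =>
    intro i l hk hl
    rw [PySem.List.pyRange_one_eq_nil (by omega),
        aDigitsEnd_stop text n i (by intro h; omega)]
    simp only [aAfterInt, aAfterFrac]
    simp [bRun, show ¬ i < n from by omega]
    omega
  | succ k ih =>
    intro i l hk hl
    by_cases hin : i < n
    · rw [PySem.List.pyRange_one_cons hin]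
      by_cases hd : pyDigit (chAt text i)
      · conv_rhs => rw [aDigitsEnd]
        simp only [bRun, bStep_three, bAcc3, hd, hin, and_self, if_true]
        exact ih (i + 1) i (by omega) (by ring)
      · rw [aDigitsEnd_stop text n i (by tauto)]
        by_cases hdot : chAt text i = '.'
        · simp only [bRun, bStep_three, hdot, if_true]
          exact bRun_st4 text n i l hin hdot hl
        · by_cases he : chAt text i = 'e' ∨ chAt text i = 'E'
          · simp only [bRun, bStep_three, bAcc6, hd, hdot, he, if_true, if_false,
              Bool.false_eq_true]
            rw [bRun_st6 text n i l hin he hl, aAfterInt]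
            simp [hdot]
          · simp only [aAfterInt, aAfterFrac]
            simp [bRun, bStep_three, hd, hdot, he, hin]
            omega
    · rw [PySem.List.pyRange_one_eq_nil (by omega),
          aDigitsEnd_stop text n i (by tauto)]
      simp only [aAfterInt, aAfterFrac]
      simp [bRun, hin]
      omega

-- state 2 (just read the leading '0' at position i)
lemma bRun_st2 (text : String) (n : Int) :
    ∀ i l, l = i →
      bRun text (PySem.List.pyRange (i + 1) n 1) 2 l = aAfterInt text n (i + 1) := by
  intro i l hl
  by_cases h1 : i + 1 ≥ n
  · rw [PySem.List.pyRange_one_eq_nil (by omega)]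
    simp only [aAfterInt, aAfterFrac]
    simp [bRun, show ¬ i + 1 < n from by omega]
    omega
  · rw [PySem.List.pyRange_one_cons (by omega)]
    by_cases hdot : chAt text (i + 1) = '.'
    · simp only [bRun, bStep_two, bAcc4, hdot, if_true]
      exact bRun_st4 text n (i + 1) l (by omega) hdot (by omega)
    · by_cases he : chAt text (i + 1) = 'e' ∨ chAt text (i + 1) = 'E'
      · simp only [bRun, bStep_two, bAcc6, hdot, he, if_true, if_false,
          Bool.false_eq_true]
        rw [bRun_st6 text n (i + 1) l (by omega) he (by omega), aAfterInt]
        simp [hdot]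
      · simp only [aAfterInt, aAfterFrac]
        simp [bRun, bStep_two, hdot, he]
        omega

-- ===== VERDICT (by name: the statement is the Claim_ definition above) =====
theorem scan_number_end_py_spec : Claim_equal_scan_number_end_py := by
  intro text start _ _
  unfold Spec_scan_number_end_py scan_number_end_py scan_number_end_py_alt
  set n := PySem.Str.len text with hn
  by_cases h0 : start < n
  · rw [PySem.List.pyRange_one_cons h0]
    by_cases hm : chAt text start = '-'
    · simp only [bRun, bStep_zero, bAcc1, h0, hm, and_self, if_true]
      by_cases h1 : start + 1 ≥ n
      · rw [PySem.List.pyRange_one_eq_nil (by omega)]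
        simp [bRun, h1]
      · rw [PySem.List.pyRange_one_cons (by omega)]
        by_cases hz : chAt text (start + 1) = '0'
        · simp only [bRun, bStep_one, bAcc2, hz, if_true]
          rw [bRun_st2 text n (start + 1) (start + 1) rfl]
          simp [h1]
        · by_cases hd : '1' ≤ chAt text (start + 1) ∧ chAt text (start + 1) ≤ '9'
          · have h3 := bRun_st3 text n (start + 1 + 1) (start + 1) (by ring)
            simp [bRun, bStep_one, bAcc3, hz, hd, h1, h3]
          · simp only [bRun, bStep_one, hz, hd, if_false]
            simp [h1]
    · have hA : ¬ (start < n ∧ chAt text start = '-') := by tauto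
      simp only [hA, if_false]
      by_cases hz : chAt text start = '0'
      · have h2 := bRun_st2 text n start start rfl
        simp [bRun, bStep_zero, bAcc2, hz, h2, show ¬ start ≥ n from by omega]
      · by_cases hd : '1' ≤ chAt text start ∧ chAt text start ≤ '9'
        · have h3 := bRun_st3 text n (start + 1) start (by ring)
          simp [bRun, bStep_zero, bAcc3, hm, hz, hd, h3, show ¬ start ≥ n from by omega]
        · simp [bRun, bStep_zero, hm, hz, hd, show ¬ start ≥ n from by omega]
  · rw [PySem.List.pyRange_one_eq_nil (by omega)]
    simp [bRun, h0]
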